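-- pv_equiv track=rewrite | github.com/Thom-fs/Tetris | game/puissance.py | create_grip
-- ===== SOURCE A (Python) =====
-- def create_grip(locked_position = {}):
--       # _ or x its w/e
--       grid = [[(0,0,0) for _ in range (10)] for _ in range (20)]
--       #first list grip = 20
--       for i in range (len(grid)):
--             #2nd list grip = 10
--             for j in range(len(grid[i])):
--                   #j=x, i=y
--                   if (j,i) in locked_position:
--                         c = locked_position[(j,i)]
--                         grid[i][j] = c
--       return grid
-- ===== SOURCE B (Python) =====
-- def create_grip(locked_position = {}):
--     grid = [[(0, 0, 0)] * 10 for _ in range(20)]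
--     for (x, y), c in locked_position.items():
--         if 0 <= x < 10 and 0 <= y < 20:
--             grid[y][x] = c
--     return grid
-- ===== Notes on version B (the rewrite author's own statement) =====
-- stated objective: faster
-- what changed: Instead of scanning all 200 cells and looking each one up in the dict, B iterates once over locked_position.items() and writes each in-bounds entry directly into the default grid.
import Mathlib
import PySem

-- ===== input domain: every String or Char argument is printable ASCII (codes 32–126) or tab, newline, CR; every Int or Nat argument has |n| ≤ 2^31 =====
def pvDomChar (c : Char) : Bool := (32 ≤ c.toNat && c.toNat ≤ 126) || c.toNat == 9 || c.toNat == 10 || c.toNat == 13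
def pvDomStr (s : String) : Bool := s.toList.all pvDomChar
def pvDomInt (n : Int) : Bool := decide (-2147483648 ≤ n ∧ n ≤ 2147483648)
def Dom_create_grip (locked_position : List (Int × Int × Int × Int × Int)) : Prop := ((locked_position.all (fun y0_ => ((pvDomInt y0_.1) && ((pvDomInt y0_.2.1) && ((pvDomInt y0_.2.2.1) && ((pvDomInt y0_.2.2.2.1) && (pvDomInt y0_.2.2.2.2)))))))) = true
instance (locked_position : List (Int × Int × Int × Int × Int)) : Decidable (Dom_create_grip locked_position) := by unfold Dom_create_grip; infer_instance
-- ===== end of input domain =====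

-- B replaces A's scan of all 200 cells (each with a dict lookup) by one pass over the
-- dict's entries, writing each in-bounds entry into the default grid.

-- ===== PORT A =====
-- the Python dict argument (keys (x,y), values (r,g,b)), built from the association list
def pvDict (lp : List (Int × Int × Int × Int × Int)) : PySem.Dict (Int × Int) (Int × Int × Int) :=
  PySem.Dict.ofList (lp.map (fun t => ((t.1, t.2.1), t.2.2)))

-- A's inner loop body: if (j,i) in locked_position: grid[i][j] = locked_position[(j,i)]
def innerA (d : PySem.Dict (Int × Int) (Int × Int × Int))
    (i : Int) (g : List (List (Int × Int × Int))) (j : Int) : List (List (Int × Int × Int)) :=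
  match d.get? (j, i) with
  | some c => PySem.List.pySetD g i (PySem.List.pySetD (PySem.List.pyGetD g i []) j c)
  | none => g

-- A's inner loop: for j in range(len(grid[i])): …
def stepA (d : PySem.Dict (Int × Int) (Int × Int × Int))
    (g : List (List (Int × Int × Int))) (i : Int) : List (List (Int × Int × Int)) :=
  (PySem.List.pyRange 0 (((PySem.List.pyGetD g i []).length : Int)) 1).foldl (innerA d i) g

def create_grip (locked_position : List (Int × Int × Int × Int × Int)) : List (List (Int × Int × Int)) :=
  let d := pvDict locked_position
  let grid : List (List (Int × Int × Int)) :=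
    (PySem.List.pyRange 0 20 1).map (fun _ => (PySem.List.pyRange 0 10 1).map (fun _ => ((0:Int), (0:Int), (0:Int))))
  (PySem.List.pyRange 0 (grid.length : Int) 1).foldl (stepA d) grid

-- ===== PORT B =====
-- B's loop body: for (x, y), c in locked_position.items(): if in bounds: grid[y][x] = c
def stepB (g : List (List (Int × Int × Int))) (kv : (Int × Int) × (Int × Int × Int)) :
    List (List (Int × Int × Int)) :=
  if 0 ≤ kv.1.1 ∧ kv.1.1 < 10 ∧ 0 ≤ kv.1.2 ∧ kv.1.2 < 20 then
    PySem.List.pySetD g kv.1.2 (PySem.List.pySetD (PySem.List.pyGetD g kv.1.2 []) kv.1.1 kv.2)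
  else g

def create_grip_alt (locked_position : List (Int × Int × Int × Int × Int)) : List (List (Int × Int × Int)) :=
  (pvDict locked_position).items.foldl stepB
    (List.replicate 20 (List.replicate 10 ((0:Int), (0:Int), (0:Int))))

-- ===== PRECONDITION & SPEC =====
def Spec_create_grip (locked_position : List (Int × Int × Int × Int × Int)) (out : List (List (Int × Int × Int))) : Prop := out = create_grip_alt locked_position
instance (locked_position : List (Int × Int × Int × Int × Int)) (out : List (List (Int × Int × Int))) : Decidable (Spec_create_grip locked_position out) := by unfold Spec_create_grip; infer_instance

-- ===== CLAIM (what is proved, stated in full; the proofs are below) =====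
def Claim_equal_create_grip : Prop := ∀ (locked_position : List (Int × Int × Int × Int × Int)), Dom_create_grip locked_position → Spec_create_grip locked_position (create_grip locked_position)

-- ===== LEMMAS AND PROOFS =====

def pvZ : Int × Int × Int := (0, 0, 0)

-- both grids keep shape 20 × 10 throughout
def GridOK (g : List (List (Int × Int × Int))) : Prop :=
  g.length = 20 ∧ ∀ r ∈ g, r.length = 10

-- row-local view of A's inner loop body at row i
def stepRowA (d : PySem.Dict (Int × Int) (Int × Int × Int)) (i : Int)
    (row : List (Int × Int × Int)) (j : Int) : List (Int × Int × Int) :=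
  match d.get? (j, i) with
  | some c => PySem.List.pySetD row j c
  | none => row

-- value at grid key k after B's overwrite loop over entries l
def cellStep (k : Int × Int) (v : Int × Int × Int) (kv : (Int × Int) × (Int × Int × Int)) : Int × Int × Int :=
  if (0 ≤ kv.1.1 ∧ kv.1.1 < 10 ∧ 0 ≤ kv.1.2 ∧ kv.1.2 < 20) ∧ kv.1 = k then kv.2 else v

def cell (l : List ((Int × Int) × (Int × Int × Int))) (k : Int × Int) (v0 : Int × Int × Int) : Int × Int × Int :=
  l.foldl (cellStep k) v0

-- getD / set helpers
theorem getD_set_eq {α : Type} {l : List α} {n : Nat} {v d : α} (h : n < l.length) :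
    (l.set n v).getD n d = v := by
  rw [List.getD_eq_getElem?_getD, List.getElem?_set_self h]; rfl

theorem getD_set_ne {α : Type} {l : List α} {m n : Nat} {v d : α} (h : m ≠ n) :
    (l.set m v).getD n d = l.getD n d := by
  rw [List.getD_eq_getElem?_getD, List.getElem?_set_ne h, ← List.getD_eq_getElem?_getD]

theorem getD_eq_getElem' {α : Type} {l : List α} {n : Nat} {d : α} (h : n < l.length) :
    l.getD n d = l[n] := by
  rw [List.getD_eq_getElem?_getD, List.getElem?_eq_getElem h]; rfl

theorem mem_set_cases {α : Type} {r : α} {l : List α} {n : Nat} {v : α}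
    (h : r ∈ l.set n v) : r = v ∨ r ∈ l := by
  rcases List.mem_or_eq_of_mem_set h with h' | h'
  · exact Or.inr h'
  · exact Or.inl h'

theorem stepRowA_some {d : PySem.Dict (Int × Int) (Int × Int × Int)} {i j : Int}
    {c : Int × Int × Int} (row : List (Int × Int × Int)) (h : d.get? (j, i) = some c) :
    stepRowA d i row j = PySem.List.pySetD row j c := by
  simp [stepRowA, h]

theorem stepRowA_none {d : PySem.Dict (Int × Int) (Int × Int × Int)} {i j : Int}
    (row : List (Int × Int × Int)) (h : d.get? (j, i) = none) :
    stepRowA d i row j = row := by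
  simp [stepRowA, h]

theorem innerA_some {d : PySem.Dict (Int × Int) (Int × Int × Int)} {i j : Int}
    {c : Int × Int × Int} (g : List (List (Int × Int × Int))) (h : d.get? (j, i) = some c) :
    innerA d i g j = PySem.List.pySetD g i (PySem.List.pySetD (PySem.List.pyGetD g i []) j c) := by
  simp [innerA, h]

theorem innerA_none {d : PySem.Dict (Int × Int) (Int × Int × Int)} {i j : Int}
    (g : List (List (Int × Int × Int))) (h : d.get? (j, i) = none) :
    innerA d i g j = g := by
  simp [innerA, h]

theorem length_stepRowA (d : PySem.Dict (Int × Int) (Int × Int × Int)) (i : Int)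
    (row : List (Int × Int × Int)) (j : Int) : (stepRowA d i row j).length = row.length := by
  cases h : d.get? (j, i)
  · rw [stepRowA_none row h]
  · rw [stepRowA_some row h, PySem.List.length_pySetD]

theorem length_rowFold (d : PySem.Dict (Int × Int) (Int × Int × Int)) (i : Int)
    (js : List Int) (row : List (Int × Int × Int)) :
    (js.foldl (stepRowA d i) row).length = row.length := by
  induction js generalizing row with
  | nil => rfl
  | cons j js ih => simp only [List.foldl_cons]; rw [ih, length_stepRowA]

theorem rowFold_getD (d : PySem.Dict (Int × Int) (Int × Int × Int)) (i : Int)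
    (js : List Int) (hjs : ∀ j ∈ js, 0 ≤ j) (row : List (Int × Int × Int)) (t : Nat)
    (ht : t < row.length) :
    (js.foldl (stepRowA d i) row).getD t pvZ =
      if (t : Int) ∈ js then (d.get? ((t : Int), i)).getD (row.getD t pvZ) else row.getD t pvZ := by
  induction js generalizing row with
  | nil => simp
  | cons j js ih =>
    have hj : 0 ≤ j := hjs j (by simp)
    have hlen : (stepRowA d i row j).length = row.length := length_stepRowA d i row j
    have hstep : (stepRowA d i row j).getD t pvZ =
        if j = (t : Int) then (d.get? ((t : Int), i)).getD (row.getD t pvZ) else row.getD t pvZ := by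
      cases h : d.get? (j, i) with
      | none =>
        rw [stepRowA_none row h]
        by_cases hje : j = (t : Int)
        · rw [if_pos hje]; rw [hje] at h; rw [h]; rfl
        · rw [if_neg hje]
      | some c =>
        rw [stepRowA_some row h, PySem.List.pySetD_of_nonneg row c hj]
        by_cases hje : j = (t : Int)
        · subst hje
          rw [if_pos rfl, Int.toNat_natCast, getD_set_eq ht, h, Option.getD_some]
        · rw [if_neg hje, getD_set_ne (by omega)]
    simp only [List.foldl_cons]
    rw [ih (fun x hx => hjs x (by simp [hx])) _ (by rw [hlen]; exact ht), hstep]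
    by_cases hje : j = (t : Int)
    · rw [if_pos hje, if_pos (List.mem_cons.2 (Or.inl hje.symm))]
      by_cases hmem : (t : Int) ∈ js
      · rw [if_pos hmem]
        cases d.get? ((t : Int), i) <;> simp
      · rw [if_neg hmem]
    · rw [if_neg hje]
      by_cases hmem : (t : Int) ∈ js
      · rw [if_pos hmem, if_pos (List.mem_cons.2 (Or.inr hmem))]
      · rw [if_neg hmem, if_neg (by
          simp only [List.mem_cons, not_or]
          exact ⟨fun h' => hje h'.symm, hmem⟩)]

theorem innerF (d : PySem.Dict (Int × Int) (Int × Int × Int)) (i : Int)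
    (h0 : 0 ≤ i) (js : List Int) (g : List (List (Int × Int × Int)))
    (h1 : i.toNat < g.length) :
    js.foldl (innerA d i) g
    = g.set i.toNat (js.foldl (stepRowA d i) (PySem.List.pyGetD g i [])) := by
  induction js generalizing g with
  | nil =>
    simp only [List.foldl_nil]
    rw [PySem.List.pyGetD_eq_getElem g [] h0 (by omega), List.set_getElem_self]
  | cons j js ih =>
    simp only [List.foldl_cons]
    cases h : d.get? (j, i) with
    | none =>
      rw [innerA_none g h, ih g h1, stepRowA_none _ h]
    | some c =>
      have hrow : PySem.List.pyGetD g i [] = g[i.toNat] :=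
        PySem.List.pyGetD_eq_getElem g [] h0 (by omega)
      rw [innerA_some g h, PySem.List.pySetD_of_nonneg _ _ h0,
        ih _ (by simpa using h1), List.set_set, stepRowA_some _ h]
      congr 2
      rw [PySem.List.pyGetD_eq_getElem _ [] h0 (by simp only [List.length_set]; omega),
        List.getElem_set_self]

theorem stepA_eq (d : PySem.Dict (Int × Int) (Int × Int × Int))
    (g : List (List (Int × Int × Int))) (i : Int) (h0 : 0 ≤ i) (h1 : i.toNat < g.length) :
    stepA d g i
      = g.set i.toNat
          ((PySem.List.pyRange 0 (((PySem.List.pyGetD g i []).length : Int)) 1).foldl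
            (stepRowA d i) (PySem.List.pyGetD g i [])) := by
  unfold stepA
  exact innerF d i h0 _ g h1

theorem stepA_ok (d : PySem.Dict (Int × Int) (Int × Int × Int))
    (g : List (List (Int × Int × Int))) (i : Int) (h0 : 0 ≤ i) (h20 : i < 20)
    (hok : GridOK g) : GridOK (stepA d g i) := by
  obtain ⟨hlen, hrows⟩ := hok
  have h1 : i.toNat < g.length := by omega
  rw [stepA_eq d g i h0 h1]
  constructor
  · simpa using hlen
  · intro r hr
    rcases mem_set_cases hr with h | h
    · rw [h, length_rowFold, PySem.List.pyGetD_eq_getElem g [] h0 (by omega)]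
      exact hrows _ (List.getElem_mem h1)
    · exact hrows r h

theorem foldA_ok (d : PySem.Dict (Int × Int) (Int × Int × Int)) (is : List Int)
    (his : ∀ i' ∈ is, 0 ≤ i' ∧ i' < 20) (g : List (List (Int × Int × Int)))
    (hok : GridOK g) : GridOK (is.foldl (stepA d) g) := by
  induction is generalizing g with
  | nil => exact hok
  | cons i' is ih =>
    have h := his i' (by simp)
    exact ih (fun x hx => his x (by simp [hx])) _ (stepA_ok d g i' h.1 h.2 hok)

theorem foldA_getD (d : PySem.Dict (Int × Int) (Int × Int × Int)) (is : List Int)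
    (his : ∀ i' ∈ is, 0 ≤ i' ∧ i' < 20) (g : List (List (Int × Int × Int))) (hok : GridOK g)
    (i j : Nat) (hi : i < 20) (hj : j < 10) :
    ((is.foldl (stepA d) g).getD i []).getD j pvZ =
      if (i : Int) ∈ is then (d.get? ((j : Int), (i : Int))).getD ((g.getD i []).getD j pvZ)
      else (g.getD i []).getD j pvZ := by
  induction is generalizing g with
  | nil => simp
  | cons i' is ih =>
    obtain ⟨hi0, hi20⟩ := his i' (by simp)
    obtain ⟨hlen, hrows⟩ := hok
    have h1 : i'.toNat < g.length := by omega
    have hrow : PySem.List.pyGetD g i' [] = g[i'.toNat] :=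
      PySem.List.pyGetD_eq_getElem g [] hi0 (by omega)
    have hrlen : (PySem.List.pyGetD g i' []).length = 10 := by
      rw [hrow]; exact hrows _ (List.getElem_mem h1)
    have hok' : GridOK (stepA d g i') := stepA_ok d g i' hi0 hi20 ⟨hlen, hrows⟩
    simp only [List.foldl_cons]
    rw [ih (fun x hx => his x (by simp [hx])) _ hok']
    have hrowval : ((stepA d g i').getD i []).getD j pvZ =
        if i'.toNat = i then (d.get? ((j : Int), i')).getD ((g.getD i []).getD j pvZ)
        else (g.getD i []).getD j pvZ := by
      rw [stepA_eq d g i' hi0 h1]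
      by_cases he : i'.toNat = i
      · subst he
        rw [if_pos rfl, getD_set_eq (by omega)]
        rw [rowFold_getD d i' _ (by
            intro x hx
            have := (PySem.List.mem_pyRange_one).1 hx
            omega) _ j (by rw [hrlen]; exact hj)]
        have hjmem : (j : Int) ∈ PySem.List.pyRange 0 ((PySem.List.pyGetD g i' []).length : Int) 1 := by
          rw [PySem.List.mem_pyRange_one, hrlen]
          constructor
          · positivity
          · exact_mod_cast hj
        rw [if_pos hjmem, hrow, getD_eq_getElem' (show i'.toNat < g.length by omega)]
      · rw [if_neg he, getD_set_ne he]
    rw [hrowval]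
    by_cases he : i'.toNat = i
    · have hie : i' = (i : Int) := by omega
      rw [if_pos he, if_pos (List.mem_cons.2 (Or.inl hie.symm))]
      by_cases hmem : (i : Int) ∈ is
      · rw [if_pos hmem, hie]
        cases d.get? ((j : Int), (i : Int)) <;> simp
      · rw [if_neg hmem, hie]
    · rw [if_neg he]
      by_cases hmem : (i : Int) ∈ is
      · rw [if_pos hmem, if_pos (List.mem_cons.2 (Or.inr hmem))]
      · rw [if_neg hmem, if_neg (by
          simp only [List.mem_cons, not_or]
          exact ⟨by omega, hmem⟩)]

theorem stepB_ok (g : List (List (Int × Int × Int))) (kv : (Int × Int) × (Int × Int × Int))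
    (hok : GridOK g) : GridOK (stepB g kv) := by
  obtain ⟨hlen, hrows⟩ := hok
  unfold stepB
  split_ifs with h
  · obtain ⟨hx0, hx10, hy0, hy20⟩ := h
    have h1 : kv.1.2.toNat < g.length := by omega
    have hrow : PySem.List.pyGetD g kv.1.2 [] = g[kv.1.2.toNat] :=
      PySem.List.pyGetD_eq_getElem g [] hy0 (by omega)
    rw [PySem.List.pySetD_of_nonneg _ _ hy0]
    constructor
    · simpa using hlen
    · intro r hr
      rcases mem_set_cases hr with h | h
      · rw [h, PySem.List.length_pySetD, hrow]
        exact hrows _ (List.getElem_mem h1)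
      · exact hrows r h
  · exact ⟨hlen, hrows⟩

theorem foldB_ok (l : List ((Int × Int) × (Int × Int × Int))) (g : List (List (Int × Int × Int)))
    (hok : GridOK g) : GridOK (l.foldl stepB g) := by
  induction l generalizing g with
  | nil => exact hok
  | cons kv l ih => exact ih _ (stepB_ok g kv hok)

theorem foldB_getD (l : List ((Int × Int) × (Int × Int × Int))) (g : List (List (Int × Int × Int)))
    (hok : GridOK g) (i j : Nat) (hi : i < 20) (hj : j < 10) :
    ((l.foldl stepB g).getD i []).getD j pvZ =
      cell l ((j : Int), (i : Int)) ((g.getD i []).getD j pvZ) := by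
  induction l generalizing g with
  | nil => simp [cell]
  | cons kv l ih =>
    obtain ⟨hlen, hrows⟩ := hok
    simp only [List.foldl_cons]
    rw [ih _ (stepB_ok g kv ⟨hlen, hrows⟩)]
    have hstep : ((stepB g kv).getD i []).getD j pvZ =
        cellStep ((j : Int), (i : Int)) ((g.getD i []).getD j pvZ) kv := by
      unfold stepB cellStep
      by_cases hb : 0 ≤ kv.1.1 ∧ kv.1.1 < 10 ∧ 0 ≤ kv.1.2 ∧ kv.1.2 < 20
      · obtain ⟨hx0, hx10, hy0, hy20⟩ := hb
        rw [if_pos ⟨hx0, hx10, hy0, hy20⟩]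
        have h1 : kv.1.2.toNat < g.length := by omega
        have hrow : PySem.List.pyGetD g kv.1.2 [] = g[kv.1.2.toNat] :=
          PySem.List.pyGetD_eq_getElem g [] hy0 (by omega)
        have hrl : g[kv.1.2.toNat].length = 10 := hrows _ (List.getElem_mem h1)
        rw [PySem.List.pySetD_of_nonneg _ _ hy0,
          PySem.List.pySetD_of_nonneg _ _ hx0, hrow]
        by_cases hy : kv.1.2.toNat = i
        · subst hy
          rw [getD_set_eq (by omega)]
          by_cases hx : kv.1.1.toNat = j
          · rw [hx, getD_set_eq (by omega)]
            have hk : kv.1 = ((j : Int), ((kv.1.2.toNat : Nat) : Int)) := by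
              have h1' : kv.1.1 = (j : Int) := by omega
              have h2' : kv.1.2 = ((kv.1.2.toNat : Nat) : Int) := by omega
              exact Prod.ext h1' h2'
            rw [if_pos ⟨⟨hx0, hx10, hy0, hy20⟩, hk⟩]
          · rw [getD_set_ne hx]
            have hk : kv.1 ≠ ((j : Int), ((kv.1.2.toNat : Nat) : Int)) := by
              intro h; apply hx
              have : kv.1.1 = (j : Int) := by rw [h]
              omega
            rw [if_neg (by intro h; exact hk h.2)]
            rw [getD_eq_getElem' (show kv.1.2.toNat < g.length by omega)]
        · rw [getD_set_ne hy]
          have hk : kv.1 ≠ ((j : Int), (i : Int)) := by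
            intro h; apply hy
            have : kv.1.2 = (i : Int) := by rw [h]
            omega
          rw [if_neg (by intro h; exact hk h.2)]
      · rw [if_neg hb, if_neg (by intro h; exact hb h.1)]
    rw [hstep]
    rfl

theorem cell_of_not_mem (l : List ((Int × Int) × (Int × Int × Int))) (k : Int × Int)
    (hk : k ∉ l.map Prod.fst) (v0 : Int × Int × Int) : cell l k v0 = v0 := by
  induction l generalizing v0 with
  | nil => rfl
  | cons kv l ih =>
    simp only [List.map_cons, List.mem_cons, not_or] at hk
    simp only [cell, List.foldl_cons]
    rw [show cellStep k v0 kv = v0 from by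
      unfold cellStep; rw [if_neg (by intro h; exact hk.1 h.2.symm)]]
    exact ih hk.2 v0

theorem cell_eq_get? (l : List ((Int × Int) × (Int × Int × Int)))
    (hnd : (l.map Prod.fst).Nodup) (k : Int × Int)
    (hk : 0 ≤ k.1 ∧ k.1 < 10 ∧ 0 ≤ k.2 ∧ k.2 < 20) (v0 : Int × Int × Int) :
    cell l k v0 = ((PySem.Dict.mk l).get? k).getD v0 := by
  induction l generalizing v0 with
  | nil => simp [cell, PySem.Dict.get?]
  | cons kv l ih =>
    simp only [List.map_cons, List.nodup_cons] at hnd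
    simp only [cell, List.foldl_cons]
    rw [PySem.Dict.get?_mk_cons]
    by_cases he : kv.1 = k
    · rw [if_pos (by exact beq_iff_eq.2 he), Option.getD_some]
      rw [show cellStep k v0 kv = kv.2 from by
        unfold cellStep
        rw [if_pos ⟨by rw [he]; exact ⟨hk.1, hk.2.1, hk.2.2.1, hk.2.2.2⟩, he⟩]]
      exact cell_of_not_mem l k (by rw [← he]; exact hnd.1) kv.2
    · rw [if_neg (by simpa using he)]
      rw [show cellStep k v0 kv = v0 from by
        unfold cellStep; rw [if_neg (by intro h; exact he h.2)]]
      exact ih hnd.2 v0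

theorem grid_ext (g g' : List (List (Int × Int × Int))) (hok : GridOK g) (hok' : GridOK g')
    (h : ∀ i j : Nat, i < 20 → j < 10 → (g.getD i []).getD j pvZ = (g'.getD i []).getD j pvZ) :
    g = g' := by
  obtain ⟨hlen, hrows⟩ := hok
  obtain ⟨hlen', hrows'⟩ := hok'
  apply List.ext_getElem (by omega)
  intro i hi1 hi2
  have hr : g[i].length = 10 := hrows _ (List.getElem_mem hi1)
  have hr' : g'[i].length = 10 := hrows' _ (List.getElem_mem hi2)
  apply List.ext_getElem (by omega)
  intro j hj1 hj2
  have := h i j (by omega) (by omega)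
  rw [getD_eq_getElem' hi1, getD_eq_getElem' hi2,
    getD_eq_getElem' hj1, getD_eq_getElem' hj2] at this
  exact this

theorem create_grip_unfold (lp : List (Int × Int × Int × Int × Int)) :
    create_grip lp
      = (PySem.List.pyRange 0 20 1).foldl (stepA (pvDict lp))
          (List.replicate 20 (List.replicate 10 pvZ)) := by
  rfl

theorem grid0_ok : GridOK (List.replicate 20 (List.replicate 10 pvZ)) := by
  constructor
  · simp
  · intro r hr
    rw [List.eq_of_mem_replicate hr]
    simp

theorem grid0_getD (i j : Nat) (hi : i < 20) (hj : j < 10) :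
    (((List.replicate 20 (List.replicate 10 pvZ)).getD i []).getD j pvZ) = pvZ := by
  rw [List.getD_replicate _ hi, List.getD_replicate _ hj]

theorem create_grip_eq_alt (lp : List (Int × Int × Int × Int × Int)) :
    create_grip lp = create_grip_alt lp := by
  rw [create_grip_unfold]
  have halt : create_grip_alt lp
      = (pvDict lp).items.foldl stepB (List.replicate 20 (List.replicate 10 pvZ)) := rfl
  rw [halt]
  set d := pvDict lp with hd
  have hisA : ∀ i' ∈ PySem.List.pyRange 0 20 1, 0 ≤ i' ∧ i' < 20 := by
    intro i' hi'
    have := (PySem.List.mem_pyRange_one).1 hi'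
    omega
  apply grid_ext
  · exact foldA_ok d _ hisA _ grid0_ok
  · exact foldB_ok d.items _ grid0_ok
  · intro i j hi hj
    rw [foldA_getD d _ hisA _ grid0_ok i j hi hj,
      if_pos (by rw [PySem.List.mem_pyRange_one]; omega),
      foldB_getD d.items _ grid0_ok i j hi hj, grid0_getD i j hi hj]
    have hnd : (d.items.map Prod.fst).Nodup := by
      have := PySem.Dict.nodup_keys_ofList (lp.map (fun t => ((t.1, t.2.1), t.2.2)))
      simpa [PySem.Dict.keys, hd, pvDict] using this
    rw [cell_eq_get? d.items hnd ((j : Int), (i : Int))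
      (by refine ⟨?_, ?_, ?_, ?_⟩ <;> simp <;> omega) pvZ]

-- ===== VERDICT (by name: the statement is the Claim_ definition above) =====
theorem create_grip_spec : Claim_equal_create_grip := by
  intro lp _
  unfold Spec_create_grip
  exact create_grip_eq_alt lp
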